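-- pv_equiv track=rewrite | github.com/ohilikeit/Coding_Test_Practice | 프로그래머스/lv3/12938. 최고의 집합/최고의 집합.py | solution
-- ===== SOURCE A (Python) =====
-- def solution(n, s):
--     answer = []
--     a = s // n
--     b = s % n
--     if a == 0:
--         return [-1]
--     for _ in range(n - b):
--         answer.append(a)
--     for _ in range(b):
--         answer.append(a+1)
--     return answer
-- ===== SOURCE B (Python) =====
-- def solution(n, s):
--     if s // n == 0:
--         return [-1]
--     answer = []
--     rem, cnt = s, n
--     for _ in range(n):
--         v = rem // cnt
--         answer.append(v)
--         rem -= v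
--         cnt -= 1
--     return answer
-- ===== Notes on version B (the rewrite author's own statement) =====
-- stated objective: alternative
-- what changed: B replaces A's closed-form split (s//n copies plus s%n incremented copies built by two replicate loops) with a single greedy loop that repeatedly appends rem//cnt and updates the running remainder and count.
import Mathlib
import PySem

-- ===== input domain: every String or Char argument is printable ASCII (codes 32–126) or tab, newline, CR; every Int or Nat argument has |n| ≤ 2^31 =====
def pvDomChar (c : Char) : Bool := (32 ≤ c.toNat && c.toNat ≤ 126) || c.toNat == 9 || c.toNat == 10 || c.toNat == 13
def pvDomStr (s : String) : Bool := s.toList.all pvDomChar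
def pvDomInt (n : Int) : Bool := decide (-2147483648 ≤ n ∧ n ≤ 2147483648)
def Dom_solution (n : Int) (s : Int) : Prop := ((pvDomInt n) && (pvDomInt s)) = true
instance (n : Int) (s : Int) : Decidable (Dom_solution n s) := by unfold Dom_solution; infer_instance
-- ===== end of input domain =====

-- B replaces A's closed-form split (s//n copies of a, then s%n copies of a+1, built by two
-- replicate loops) with a single greedy loop appending rem//cnt while decrementing rem and cnt
-- (objective: alternative decomposition, same cost).

-- ===== PORT A =====
def solution (n : Int) (s : Int) : List Int :=
  let answer : List Int := []
  let a := PySem.Int.floordiv s n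
  let b := PySem.Int.mod s n
  if a = 0 then [-1]
  else
    let answer := (PySem.List.pyRange 0 (n - b) 1).foldl (fun acc _ => acc ++ [a]) answer
    let answer := (PySem.List.pyRange 0 b 1).foldl (fun acc _ => acc ++ [a + 1]) answer
    answer

-- ===== PORT B =====
-- the n-iteration greedy loop of Source B; the Nat argument counts the remaining iterations of range(n)
def altLoop (rem : Int) (cnt : Int) : Nat → List Int
  | 0 => []
  | Nat.succ k =>
      let v := PySem.Int.floordiv rem cnt
      v :: altLoop (rem - v) (cnt - 1) k

def solution_alt (n : Int) (s : Int) : List Int :=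
  if PySem.Int.floordiv s n = 0 then [-1]
  else altLoop s n n.toNat

-- ===== PRECONDITION & SPEC =====
-- Pre_ excludes exactly n = 0, where Python A raises ZeroDivisionError on s // n.
def Pre_solution (n : Int) (s : Int) : Prop := n ≠ 0
instance (n : Int) (s : Int) : Decidable (Pre_solution n s) := by unfold Pre_solution; infer_instance
def pvWitness_solution : Int × Int := (3, 11)

def Spec_solution (n : Int) (s : Int) (out : List Int) : Prop := out = solution_alt n s
instance (n : Int) (s : Int) (out : List Int) : Decidable (Spec_solution n s out) := by unfold Spec_solution; infer_instance

-- ===== CLAIM (what is proved, stated in full; the proofs are below) =====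
def Claim_equal_solution : Prop := ∀ (n : Int) (s : Int), Dom_solution n s → Pre_solution n s → Spec_solution n s (solution n s)

-- ===== LEMMAS AND PROOFS =====

-- folding "append one x" over any list pins the result: init ++ length-many copies of x
theorem foldl_append_const {α : Type} (x : Int) :
    ∀ (l : List α) (init : List Int),
      l.foldl (fun acc _ => acc ++ [x]) init = init ++ List.replicate l.length x := by
  intro l
  induction l with
  | nil => intro init; simp
  | cons h t ih =>
      intro init
      simp [List.foldl, ih, List.replicate_succ]

-- the greedy loop run for c steps with count c produces A's closed-form list
theorem altLoop_eq :
    ∀ (c : Nat) (r : Int), 0 < c →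
      altLoop r (c : Int) c =
        List.replicate (c - (PySem.Int.mod r c).toNat) (PySem.Int.floordiv r c)
          ++ List.replicate (PySem.Int.mod r c).toNat (PySem.Int.floordiv r c + 1) := by
  intro c
  induction c with
  | zero => intro r h; omega
  | succ k ih =>
      intro r _
      set a := PySem.Int.floordiv r (k + 1 : Nat) with ha
      set b := PySem.Int.mod r (k + 1 : Nat) with hb
      have hkpos : (0 : Int) < ((k + 1 : Nat) : Int) := by exact_mod_cast Nat.succ_pos k
      have hsum : a * ((k + 1 : Nat) : Int) + b = r := PySem.Int.floordiv_mul_add_mod r _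
      have hb0 : 0 ≤ b := PySem.Int.mod_nonneg r hkpos
      have hbk : b < ((k + 1 : Nat) : Int) := PySem.Int.mod_lt r hkpos
      have hstep : altLoop r ((k + 1 : Nat) : Int) (k + 1)
          = a :: altLoop (r - a) (((k + 1 : Nat) : Int) - 1) k := by
        simp [altLoop, ha]
      rcases Nat.eq_zero_or_pos k with hk0 | hkpos'
      · subst hk0
        have hbz : b = 0 := by
          have : b < (1 : Int) := by exact_mod_cast hbk
          omega
        simp only [hstep, hbz]
        simp [altLoop]
      · -- k ≥ 1 : analyse the remainder against the new count k
        have hkInt : (0 : Int) < (k : Int) := by exact_mod_cast hkpos'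
        have hcast : ((k + 1 : Nat) : Int) - 1 = (k : Int) := by push_cast; ring
        have hr' : r - a = a * (k : Int) + b := by
          have : a * ((k + 1 : Nat) : Int) = a * (k : Int) + a := by push_cast; ring
          omega
        by_cases hlt : b < (k : Int)
        · -- remainder unchanged: quotient stays a, remainder stays b
          have hfd : PySem.Int.floordiv (r - a) (k : Int) = a := by
            rw [PySem.Int.floordiv_eq_iff_of_pos hkInt]
            have h1 : (a + 1) * (k : Int) = a * (k : Int) + (k : Int) := by ring
            omega
          have hmd : PySem.Int.mod (r - a) (k : Int) = b := by
            have := PySem.Int.floordiv_mul_add_mod (r - a) (k : Int)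
            rw [hfd] at this
            omega
          have := ih (r - a) hkpos'
          rw [hstep, hcast, this, hfd, hmd]
          have hble : b.toNat < k := by omega
          have : k + 1 - b.toNat = (k - b.toNat) + 1 := by omega
          rw [this, List.replicate_succ]
          simp
        · -- b = k : quotient becomes a+1, remainder 0, all remaining entries a+1
          have hbe : b = (k : Int) := by omega
          have hfd : PySem.Int.floordiv (r - a) (k : Int) = a + 1 := by
            rw [PySem.Int.floordiv_eq_iff_of_pos hkInt]
            have h1 : (a + 1 + 1) * (k : Int) = a * (k : Int) + (k : Int) + (k : Int) := by ring
            have h2 : (a + 1) * (k : Int) = a * (k : Int) + (k : Int) := by ring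
            omega
          have hmd : PySem.Int.mod (r - a) (k : Int) = 0 := by
            have := PySem.Int.floordiv_mul_add_mod (r - a) (k : Int)
            rw [hfd] at this
            have h2 : (a + 1) * (k : Int) = a * (k : Int) + (k : Int) := by ring
            omega
          have := ih (r - a) hkpos'
          rw [hstep, hcast, this, hfd, hmd]
          have hbt : b.toNat = k := by omega
          have h1 : k + 1 - k = 1 := by omega
          rw [hbt, h1]
          simp [List.replicate_succ]

-- ===== VERDICT (by name: the statement is the Claim_ definition above) =====
theorem solution_spec : Claim_equal_solution := by
  intro n s _ hn
  unfold Spec_solution solution solution_alt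
  set a := PySem.Int.floordiv s n with ha
  set b := PySem.Int.mod s n with hb
  by_cases haz : a = 0
  · simp [haz]
  · simp only [haz, if_false]
    rw [foldl_append_const, foldl_append_const]
    rcases lt_or_gt_of_ne hn with hneg | hpos
    · -- n < 0 : both sides are []
      have hbnd := PySem.Int.mod_neg_bounds s hneg
      rw [← hb] at hbnd
      have h1 : n - b ≤ 0 := by omega
      have h2 : b ≤ 0 := by omega
      have hnt : n.toNat = 0 := by omega
      rw [PySem.List.pyRange_one_eq_nil (by omega : (n - b : Int) ≤ 0),
          PySem.List.pyRange_one_eq_nil (by omega : (b : Int) ≤ 0), hnt]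
      simp [altLoop]
    · -- n > 0 : apply the loop characterisation
      have hc : ((n.toNat : Int)) = n := Int.toNat_of_nonneg (le_of_lt hpos)
      have hcp : 0 < n.toNat := by omega
      have := altLoop_eq n.toNat s hcp
      rw [hc] at this
      rw [this, ← ha, ← hb]
      have hb0 : 0 ≤ b := by rw [hb]; exact PySem.Int.mod_nonneg s hpos
      have hbn : b < n := by rw [hb]; exact PySem.Int.mod_lt s hpos
      have hlen1 : (PySem.List.pyRange 0 (n - b) 1).length = (n - b).toNat := by
        rw [PySem.List.length_pyRange_one]; omega
      have hlen2 : (PySem.List.pyRange 0 b 1).length = b.toNat := by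
        rw [PySem.List.length_pyRange_one]; omega
      have hnb : (n - b).toNat = n.toNat - b.toNat := by omega
      rw [hlen1, hlen2, hnb]
      simp
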